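-- pv_equiv track=rewrite | github.com/Bandi-Lavanya/DSA-Python- | stacksAndQueues/noOfNGE.py | num_nges_brute
-- ===== SOURCE A (Python) =====
-- def num_nges_brute(arr):
--     n = len(arr)
--     res = [0] * n
--     for i in range(n):
--         count = 0
--         for j in range(i + 1, n):
--             if arr[j] > arr[i]:
--                 count += 1
--             elif arr[j] <= arr[i]:
--                 break
--         res[i] = count
--     return res
-- ===== SOURCE B (Python) =====
-- def num_nges_brute(arr):
--     # Monotonic stack scanned right-to-left: each stack entry (value, count)
--     # lets us skip an entire run of already-counted greater elements at once.
--     res = []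
--     stack = []  # entries (value, count); top at the end
--     for x in reversed(arr):
--         c = 0
--         while stack and stack[-1][0] > x:
--             v, k = stack.pop()
--             c += 1 + k
--         stack.append((x, c))
--         res.append(c)
--     res.reverse()
--     return res
-- ===== Notes on version B (the rewrite author's own statement) =====
-- stated objective: faster
-- what changed: Replaces the per-index rescan (inner loop restarting at i+1 for every i) with a single right-to-left pass over a monotonic stack of (value, run-length) pairs, skipping whole counted runs in O(1) amortized per element.
import Mathlib
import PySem

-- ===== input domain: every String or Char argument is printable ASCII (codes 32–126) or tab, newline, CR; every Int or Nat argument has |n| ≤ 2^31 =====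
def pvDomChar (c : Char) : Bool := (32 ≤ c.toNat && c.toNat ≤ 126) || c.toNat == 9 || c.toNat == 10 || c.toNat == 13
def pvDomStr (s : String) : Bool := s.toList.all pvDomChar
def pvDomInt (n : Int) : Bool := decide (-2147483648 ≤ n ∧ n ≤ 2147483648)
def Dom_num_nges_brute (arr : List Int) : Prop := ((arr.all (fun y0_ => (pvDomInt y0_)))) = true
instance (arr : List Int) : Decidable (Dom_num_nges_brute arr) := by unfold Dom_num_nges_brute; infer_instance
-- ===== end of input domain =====

-- B replaces A's per-index rescan by a single right-to-left monotonic-stack pass (faster, asymptotic).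


-- ===== PORT A =====
-- inner loop: for j in range(i+1, n): if arr[j] > arr[i]: count += 1 elif arr[j] <= arr[i]: break
-- (the elif condition is the exact negation of the if, so 'break' = return count; index j is in range, pyGetD is exact)
def pvInnerA (arr : List Int) (ai : Int) : List Int → Int → Int
  | [], count => count
  | j :: js, count =>
      if PySem.List.pyGetD arr j 0 > ai then pvInnerA arr ai js (count + 1)
      else count

def num_nges_brute (arr : List Int) : List Int :=
  let n : Int := arr.length
  let res0 : List Int := List.replicate arr.length 0
  (PySem.List.pyRange 0 n 1).foldl
    (fun res i =>
      let count := pvInnerA arr (PySem.List.pyGetD arr i 0) (PySem.List.pyRange (i + 1) n 1) 0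
      PySem.List.pySetD res i count)
    res0

-- ===== PORT B =====
-- while stack and stack[-1][0] > x: v, k = stack.pop(); c += 1 + k   (stack top = list head)
def pvPopB (x : Int) : List (Int × Int) → Int × List (Int × Int)
  | [] => (0, [])
  | (v, k) :: rest =>
      if v > x then
        let r := pvPopB x rest
        (1 + k + r.1, r.2)
      else (0, (v, k) :: rest)

-- for x in reversed(arr): … res.append(c); res.reverse()  =  foldr building the result front-first
def num_nges_brute_alt (arr : List Int) : List Int :=
  (arr.foldr
    (fun x acc =>
      let r := pvPopB x acc.2
      (r.1 :: acc.1, (x, r.1) :: r.2))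
    (([] : List Int), ([] : List (Int × Int)))).1

-- ===== PRECONDITION & SPEC =====
def Spec_num_nges_brute (arr : List Int) (out : List Int) : Prop := out = num_nges_brute_alt arr
instance (arr : List Int) (out : List Int) : Decidable (Spec_num_nges_brute arr out) := by unfold Spec_num_nges_brute; infer_instance

-- ===== CLAIM (what is proved, stated in full; the proofs are below) =====
def Claim_equal_num_nges_brute : Prop := ∀ (arr : List Int), Dom_num_nges_brute arr → Spec_num_nges_brute arr (num_nges_brute arr)

-- ===== LEMMAS AND PROOFS =====

-- the common characterization: res[i] = length of the run of elements > arr[i] right after i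
def pvCnt (x : Int) (t : List Int) : Int := ((t.takeWhile (fun y => decide (x < y))).length : Int)

def pvG : List Int → List Int
  | [] => []
  | x :: t => pvCnt x t :: pvG t

-- ---- A side ----
lemma pvInnerA_eq (arr : List Int) (ai : Int) : ∀ (a : Nat) (c : Int),
    pvInnerA arr ai (PySem.List.pyRange (a : Int) (arr.length : Int) 1) c
      = c + pvCnt ai (arr.drop a) := by
  intro a
  induction h : arr.length - a generalizing a with
  | zero =>
    intro c
    have hle : arr.length ≤ a := by omega
    rw [PySem.List.pyRange_one_eq_nil (by exact_mod_cast hle)]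
    simp [pvInnerA, pvCnt, List.drop_eq_nil_of_le hle]
  | succ m ih =>
    intro c
    have hlt : a < arr.length := by omega
    rw [PySem.List.pyRange_one_cons (by exact_mod_cast hlt)]
    have hget : PySem.List.pyGetD arr (a : Int) 0 = arr[a] := by
      simp [PySem.List.pyGetD_natCast, List.getD_eq_getElem?_getD, hlt]
    have hdrop : arr.drop a = arr[a] :: arr.drop (a + 1) := List.drop_eq_getElem_cons hlt
    have hcast : ((a : Int) + 1) = ((a + 1 : Nat) : Int) := by push_cast; ring
    simp only [pvInnerA, hget, hcast]
    by_cases hx : ai < arr[a]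
    · rw [if_pos (by exact_mod_cast hx), ih (a + 1) (by omega)]
      rw [pvCnt, pvCnt, hdrop, List.takeWhile_cons, if_pos (by simpa using hx), List.length_cons]
      push_cast
      ring
    · rw [if_neg (by exact_mod_cast hx)]
      rw [pvCnt, hdrop, List.takeWhile_cons, if_neg (by simpa using hx)]
      simp

lemma pvOuterA (arr : List Int) : ∀ (m : Nat) (res : List Int), m ≤ res.length →
    (PySem.List.pyRange 0 (m : Int) 1).foldl
      (fun res i =>
        PySem.List.pySetD res i
          (pvInnerA arr (PySem.List.pyGetD arr i 0)
            (PySem.List.pyRange (i + 1) (arr.length : Int) 1) 0))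
      res
    = (List.range m).map
        (fun (k : Nat) => pvInnerA arr (PySem.List.pyGetD arr (k : Int) 0)
          (PySem.List.pyRange ((k : Int) + 1) (arr.length : Int) 1) 0)
      ++ res.drop m := by
  intro m
  induction m with
  | zero => intro res _; simp [PySem.List.pyRange_one_eq_nil]
  | succ m ih =>
    intro res hm
    have hmlt : m < res.length := by omega
    rw [show (((m + 1 : Nat)) : Int) = (m : Int) + 1 by push_cast; ring,
        PySem.List.pyRange_one_succ_right (by exact_mod_cast (Nat.zero_le m)),
        List.foldl_append, ih res (by omega)]
    simp only [List.foldl_cons, List.foldl_nil]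
    rw [PySem.List.pySetD_natCast]
    have hlen : ((List.range m).map
        (fun (k : Nat) => pvInnerA arr (PySem.List.pyGetD arr (k : Int) 0)
          (PySem.List.pyRange ((k : Int) + 1) (arr.length : Int) 1) 0)).length = m := by
      simp
    have hdrops : res.drop m = res[m] :: res.drop (m + 1) := List.drop_eq_getElem_cons hmlt
    rw [List.set_append_right _ _ (by omega), hlen, Nat.sub_self, hdrops, List.set_cons_zero,
        List.range_succ, List.map_append]
    simp [List.append_assoc]

lemma pvMapRange_eq_G : ∀ (arr : List Int),
    (List.range arr.length).map (fun k => pvCnt (arr.getD k 0) (arr.drop (k + 1))) = pvG arr := by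
  intro arr
  induction arr with
  | nil => simp [pvG]
  | cons x t ih =>
    simp only [List.length_cons, List.range_succ_eq_map, List.map_cons, List.map_map, pvG]
    refine congrArg₂ List.cons ?_ ?_
    · simp
    · rw [← ih]
      apply List.map_congr_left
      intro k _
      simp [Function.comp]

lemma pvA_eq_G (arr : List Int) : num_nges_brute arr = pvG arr := by
  unfold num_nges_brute
  simp only
  rw [pvOuterA arr arr.length (List.replicate arr.length 0) (by simp)]
  rw [List.drop_eq_nil_of_le (by simp), List.append_nil]
  rw [← pvMapRange_eq_G arr]
  apply List.map_congr_left
  intro k hk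
  have hklt : k < arr.length := List.mem_range.mp hk
  have hcast : ((k : Int) + 1) = ((k + 1 : Nat) : Int) := by push_cast; ring
  rw [hcast, pvInnerA_eq arr _ (k + 1) 0]
  simp [PySem.List.pyGetD_natCast]

-- ---- B side ----
-- stack invariant: the stack is the chain of "jump" entries for the current suffix
def pvRep : List (Int × Int) → List Int → Prop
  | [], s => s = []
  | (v, c) :: st, s =>
      ∃ t, s = v :: t ∧ c = pvCnt v t
        ∧ pvRep st (t.drop (t.takeWhile (fun y => decide (v < y))).length)

lemma pvTakeWhile_chain (x v : Int) (t : List Int) (hxv : x < v) :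
    t.takeWhile (fun y => decide (x < y))
      = t.takeWhile (fun y => decide (v < y))
        ++ (t.drop (t.takeWhile (fun y => decide (v < y))).length).takeWhile
            (fun y => decide (x < y)) := by
  induction t with
  | nil => simp
  | cons y t ih =>
    by_cases hvy : v < y
    · rw [List.takeWhile_cons (p := fun y => decide (x < y)), if_pos (by simp; omega),
          List.takeWhile_cons (p := fun y => decide (v < y)), if_pos (by simpa using hvy)]
      simp only [List.length_cons, List.drop_succ_cons, List.cons_append]
      rw [ih]
    · rw [List.takeWhile_cons (p := fun y => decide (v < y)), if_neg (by simpa using hvy)]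
      simp

lemma pvPopB_spec (x : Int) : ∀ (st : List (Int × Int)) (s : List Int), pvRep st s →
    pvPopB x st = (pvCnt x s, (pvPopB x st).2)
      ∧ pvRep (pvPopB x st).2 (s.drop (s.takeWhile (fun y => decide (x < y))).length) := by
  intro st
  induction st with
  | nil =>
    intro s hs
    simp only [pvRep] at hs
    subst hs
    simp [pvPopB, pvRep, pvCnt]
  | cons p st ih =>
    obtain ⟨v, c⟩ := p
    intro s hs
    obtain ⟨t, hst, hc, hrep⟩ := hs
    subst hst
    by_cases hxv : x < v
    · have ihh := ih _ hrep
      simp only [pvPopB, if_pos (by exact_mod_cast hxv)]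
      have htw : (v :: t).takeWhile (fun y => decide (x < y))
          = v :: (t.takeWhile (fun y => decide (v < y))
            ++ (t.drop (t.takeWhile (fun y => decide (v < y))).length).takeWhile
                (fun y => decide (x < y))) := by
        rw [List.takeWhile_cons, if_pos (by simpa using hxv), ← pvTakeWhile_chain x v t hxv]
      constructor
      · have h1 := congrArg Prod.fst ihh.1
        simp only at h1
        rw [h1]
        simp [pvCnt, htw, hc]
        ring
      · rw [htw]
        simp only [List.length_cons, List.length_append, List.drop_succ_cons, ← List.drop_drop]
        exact ihh.2
    · simp only [pvPopB, if_neg (by exact_mod_cast hxv)]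
      constructor
      · simp [pvCnt, hxv]
      · simp only [List.takeWhile_cons, hxv]
        simp [pvRep, hc, hrep]

lemma pvB_invariant : ∀ (s : List Int),
    (s.foldr
      (fun x acc =>
        let r := pvPopB x acc.2
        (r.1 :: acc.1, (x, r.1) :: r.2))
      (([] : List Int), ([] : List (Int × Int)))).1 = pvG s
    ∧ pvRep (s.foldr
      (fun x acc =>
        let r := pvPopB x acc.2
        (r.1 :: acc.1, (x, r.1) :: r.2))
      (([] : List Int), ([] : List (Int × Int)))).2 s := by
  intro s
  induction s with
  | nil => exact ⟨rfl, rfl⟩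
  | cons x t ih =>
    obtain ⟨hres, hrep⟩ := ih
    have hpop := pvPopB_spec x _ _ hrep
    have hfst := congrArg Prod.fst hpop.1
    simp only at hfst
    simp only [List.foldr_cons]
    constructor
    · simp only [pvG, ← hres]
      rw [hfst]
    · refine ⟨t, rfl, ?_, ?_⟩
      · rw [hfst]
      · simpa [pvCnt] using hpop.2

lemma pvB_eq_G (arr : List Int) : num_nges_brute_alt arr = pvG arr := (pvB_invariant arr).1

-- ===== VERDICT (by name: the statement is the Claim_ definition above) =====
theorem num_nges_brute_spec : Claim_equal_num_nges_brute := by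
  intro arr _
  unfold Spec_num_nges_brute
  rw [pvA_eq_G, pvB_eq_G]
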